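-- pv_equiv track=rewrite | github.com/UPstartDeveloper/CS-2.1-Trees-Sorting | Code/sorting_iterative.py | swap_left_to_right
-- ===== SOURCE A (Python) =====
-- def swap_adjacent_items(items, left_index, right_index):
--     """Switch elements located in left and right indices in items array.
--        When this function is invoked, right element should be less than the
--        left element.
--
--     """
--     left_item = items[left_index]
--     right_item = items[right_index]
--     items[left_index] = right_item
--     items[right_index] = left_item
--     return items
--
-- def swap_left_to_right(items, num_swaps, sorted_right):
--     """Iterates through a list, swapping out of place elements.
--        Returns the number of swaps made during the traversal.
--     """
--     for i in range(1, sorted_right):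
--         left_index = i - 1
--         right_index = i
--         # make swaps between adjacent elements as needed
--         if items[left_index] > items[right_index]:
--             items = swap_adjacent_items(items, left_index, right_index)
--             num_swaps += 1
--     return num_swaps
-- ===== SOURCE B (Python) =====
-- def swap_left_to_right(items, num_swaps, sorted_right):
--     """Count the swaps one bubble pass over items[:sorted_right] would make,
--        by threading the running maximum instead of performing the swaps.
--        (Unlike A, this does not mutate items; the return value is the same.)
--     """
--     if sorted_right <= 1:
--         return num_swaps
--     hi = items[0]
--     for x in items[1:sorted_right]:
--         if x < hi:
--             num_swaps += 1
--         else: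
--             hi = x
--     return num_swaps
-- ===== Notes on version B (the rewrite author's own statement) =====
-- stated objective: simpler
-- what changed: B drops the swap helper and all list writes: it threads the running maximum of the scanned prefix through a single read-only pass over a slice and counts each element the maximum exceeds, instead of index-based adjacent swapping of the list in place (return value identical; A additionally mutates items).
import Mathlib
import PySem

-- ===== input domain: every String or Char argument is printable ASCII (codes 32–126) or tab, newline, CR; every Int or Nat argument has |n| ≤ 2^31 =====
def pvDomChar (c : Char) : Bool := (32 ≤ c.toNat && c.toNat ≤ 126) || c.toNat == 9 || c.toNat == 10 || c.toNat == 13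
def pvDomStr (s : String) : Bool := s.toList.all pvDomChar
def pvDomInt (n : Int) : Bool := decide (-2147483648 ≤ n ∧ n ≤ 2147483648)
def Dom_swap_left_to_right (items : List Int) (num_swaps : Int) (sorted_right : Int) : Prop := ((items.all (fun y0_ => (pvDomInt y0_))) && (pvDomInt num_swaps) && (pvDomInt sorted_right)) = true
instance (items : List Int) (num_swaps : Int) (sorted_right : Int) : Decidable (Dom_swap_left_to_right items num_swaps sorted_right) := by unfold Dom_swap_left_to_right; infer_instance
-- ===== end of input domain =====

-- B drops the swap helper and all list writes: one read-only pass threading the running maximum,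
-- counting the elements it exceeds (same return value; NOTE: A mutates items in place, B does not —
-- the equivalence proved here is about the RETURN value only).


-- ===== PORT A =====
-- swap_adjacent_items: pyGetD/pySetD are exact here since Pre_ keeps every used index in range
def pvSwapAdj (items : List Int) (left_index right_index : Int) : List Int :=
  let left_item := PySem.List.pyGetD items left_index 0
  let right_item := PySem.List.pyGetD items right_index 0
  PySem.List.pySetD (PySem.List.pySetD items left_index right_item) right_index left_item

-- loop body of A: compare items[i-1] > items[i], swap and count
def pvStepA (st : List Int × Int) (i : Int) : List Int × Int :=
  if PySem.List.pyGetD st.1 (i - 1) 0 > PySem.List.pyGetD st.1 i 0 then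
    (pvSwapAdj st.1 (i - 1) i, st.2 + 1)
  else st

def swap_left_to_right (items : List Int) (num_swaps : Int) (sorted_right : Int) : Int :=
  ((PySem.List.pyRange 1 sorted_right 1).foldl pvStepA (items, num_swaps)).2

-- ===== PORT B =====
-- loop body of B: state (hi, count)
def pvStepB (st : Int × Int) (x : Int) : Int × Int :=
  if x < st.1 then (st.1, st.2 + 1) else (x, st.2)

def swap_left_to_right_alt (items : List Int) (num_swaps : Int) (sorted_right : Int) : Int :=
  if sorted_right ≤ 1 then num_swaps
  else
    -- hi = items[0]; the empty-list IndexError is excluded by Pre_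
    ((PySem.List.slice items (some 1) (some sorted_right)).foldl pvStepB
      (items.headD 0, num_swaps)).2

-- ===== PRECONDITION & SPEC =====
-- Pre_ excludes exactly the inputs where the Python A raises IndexError:
-- a loop index reaches len(items) when 2 ≤ sorted_right and sorted_right > len(items).
def Pre_swap_left_to_right (items : List Int) (num_swaps : Int) (sorted_right : Int) : Prop :=
  sorted_right ≤ (items.length : Int) ∨ sorted_right ≤ 1
instance (items : List Int) (num_swaps : Int) (sorted_right : Int) : Decidable (Pre_swap_left_to_right items num_swaps sorted_right) := by unfold Pre_swap_left_to_right; infer_instance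

def pvWitness_swap_left_to_right : List Int × Int × Int := ([3, 1, 2], 0, 3)

def Spec_swap_left_to_right (items : List Int) (num_swaps : Int) (sorted_right : Int) (out : Int) : Prop := out = swap_left_to_right_alt items num_swaps sorted_right
instance (items : List Int) (num_swaps : Int) (sorted_right : Int) (out : Int) : Decidable (Spec_swap_left_to_right items num_swaps sorted_right out) := by unfold Spec_swap_left_to_right; infer_instance

-- ===== CLAIM (what is proved, stated in full; the proofs are below) =====
def Claim_equal_swap_left_to_right : Prop := ∀ (items : List Int) (num_swaps : Int) (sorted_right : Int), Dom_swap_left_to_right items num_swaps sorted_right → Pre_swap_left_to_right items num_swaps sorted_right → Spec_swap_left_to_right items num_swaps sorted_right (swap_left_to_right items num_swaps sorted_right)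


-- ===== LEMMAS AND PROOFS =====

-- Invariant after k iterations of A's loop: the swap counts of A and B agree, the list keeps its
-- length, positions > k are untouched, and position k holds B's running maximum.
theorem pv_key (k : Nat) (items : List Int) (ns : Int) (hk : k < items.length) :
    ((PySem.List.pyRange 1 (1 + (k : Int)) 1).foldl pvStepA (items, ns)).2
      = ((items.tail.take k).foldl pvStepB (items.headD 0, ns)).2 ∧
    ((PySem.List.pyRange 1 (1 + (k : Int)) 1).foldl pvStepA (items, ns)).1.length = items.length ∧
    (∀ j : Nat, k < j → ((PySem.List.pyRange 1 (1 + (k : Int)) 1).foldl pvStepA (items, ns)).1[j]? = items[j]?) ∧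
    ((PySem.List.pyRange 1 (1 + (k : Int)) 1).foldl pvStepA (items, ns)).1[k]?
      = some ((items.tail.take k).foldl pvStepB (items.headD 0, ns)).1 := by
  induction k with
  | zero =>
      rw [show (1 + ((0 : Nat) : Int)) = 1 by norm_num, PySem.List.pyRange_one_eq_nil le_rfl]
      cases items with
      | nil => simp at hk
      | cons a t => simp
  | succ k ih =>
      have hk' : k < items.length := Nat.lt_of_succ_lt hk
      obtain ⟨ih1, ih2, ih3, ih4⟩ := ih hk'
      have hrange : PySem.List.pyRange 1 (1 + ((k + 1 : Nat) : Int)) 1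
          = PySem.List.pyRange 1 (1 + (k : Int)) 1 ++ [1 + (k : Int)] := by
        have := PySem.List.pyRange_one_succ_right (a := 1) (b := 1 + (k : Int)) (by omega)
        rw [show (1 + ((k + 1 : Nat) : Int)) = (1 + (k : Int)) + 1 by push_cast; ring]
        exact this
      have htail : items.tail[k]? = items[k + 1]? := List.getElem?_tail
      have htake : items.tail.take (k + 1)
          = items.tail.take k ++ [items[k + 1]] := by
        rw [List.take_add_one, htail, List.getElem?_eq_getElem hk]
        simp
      set L := ((PySem.List.pyRange 1 (1 + (k : Int)) 1).foldl pvStepA (items, ns)) with hL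
      set Bst := ((items.tail.take k).foldl pvStepB (items.headD 0, ns)) with hB
      have hLget1 : PySem.List.pyGetD L.1 ((1 + (k : Int)) - 1) 0 = Bst.1 := by
        rw [show (1 + (k : Int)) - 1 = ((k : Nat) : Int) by ring]
        rw [PySem.List.pyGetD_natCast, List.getD_eq_getElem?_getD, ih4]
        rfl
      have hx : items[k + 1]? = some items[k + 1] := List.getElem?_eq_getElem hk
      have hLget2 : PySem.List.pyGetD L.1 (1 + (k : Int)) 0 = items[k + 1] := by
        rw [show (1 + (k : Int)) = (((k + 1 : Nat)) : Int) by push_cast; ring]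
        rw [PySem.List.pyGetD_natCast, List.getD_eq_getElem?_getD, ih3 (k + 1) (Nat.lt_succ_self k), hx]
        rfl
      rw [hrange, htake, List.foldl_append, List.foldl_append, ← hL, ← hB]
      simp only [List.foldl_cons, List.foldl_nil]
      unfold pvStepA pvStepB pvSwapAdj
      rw [hLget1, hLget2]
      by_cases hsw : items[k + 1] < Bst.1
      · rw [if_pos hsw, if_pos hsw]
        rw [show (1 + (k : Int)) - 1 = ((k : Nat) : Int) by ring,
            show (1 + (k : Int)) = (((k + 1 : Nat)) : Int) by push_cast; ring]
        simp only [PySem.List.pySetD_natCast]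
        refine ⟨by rw [ih1], by simpa using ih2, ?_, ?_⟩
        · intro j hj
          rw [List.getElem?_set_ne (by omega), List.getElem?_set_ne (by omega)]
          exact ih3 j (by omega)
        · have hlen2 : k + 1 < (L.1.set k items[k + 1]).length := by
            simp only [List.length_set, ih2]; omega
          rw [List.getElem?_set_self hlen2]
      · rw [if_neg hsw, if_neg hsw]
        refine ⟨ih1, ih2, fun j hj => ih3 j (by omega), ?_⟩
        simp only
        rw [ih3 (k + 1) (Nat.lt_succ_self k), hx]

-- ===== VERDICT (by name: the statement is the Claim_ definition above) =====
theorem swap_left_to_right_spec : Claim_equal_swap_left_to_right := by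
  intro items ns sr _ hpre
  unfold Spec_swap_left_to_right swap_left_to_right swap_left_to_right_alt
  by_cases h1 : sr ≤ 1
  · rw [PySem.List.pyRange_one_eq_nil h1, if_pos h1]
    simp
  · rw [if_neg h1]
    have hlen : sr ≤ (items.length : Int) := by
      rcases hpre with h | h
      · exact h
      · omega
    set k : Nat := (sr - 1).toNat with hkdef
    have hsr : sr = 1 + (k : Int) := by omega
    have hk : k < items.length := by omega
    have hslice : PySem.List.slice items (some 1) (some (1 + (k : Int))) = items.tail.take k := by
      rw [PySem.List.slice_toNat items (by norm_num) (by omega)]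
      rw [show ((1 : Int) + (k : Int)).toNat = k + 1 by omega]
      simp [List.drop_one]
    rw [hsr, hslice]
    exact (pv_key k items ns hk).1
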